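-- pv_equiv track=rewrite | github.com/amoghastagi/emailscrapers | devpost_participants_scraper.py | classify_link
-- ===== SOURCE A (Python) =====
-- def classify_link(url, text):
--     """Classify a link based on its URL or text"""
--     url_lower = url.lower()
--     text_lower = text.lower()
--
--     if 'github.com' in url_lower or 'github' in text_lower:
--         return 'github'
--     elif 'linkedin.com' in url_lower or 'linkedin' in text_lower:
--         return 'linkedin'
--     elif 'twitter.com' in url_lower or 'x.com' in url_lower or 'twitter' in text_lower:
--         return 'twitter'
--     elif 'website' in text_lower or 'portfolio' in text_lower:
--         return 'website'
--     elif 'mailto:' in url_lower or 'email' in text_lower: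
--         return 'email'
--     elif 'instagram.com' in url_lower or 'instagram' in text_lower:
--         return 'instagram'
--     elif 'youtube.com' in url_lower or 'youtu.be' in url_lower or 'youtube' in text_lower:
--         return 'youtube'
--     elif 'medium.com' in url_lower or 'medium' in text_lower:
--         return 'medium'
--     elif not any(domain in url_lower for domain in ['facebook.com', 'google.com', 'apple.com']):
--         return 'website'
--
--     return 'other'
-- ===== SOURCE B (Python) =====
-- # B: instead of a first-match rule ladder, score every pattern against the input
-- # exhaustively, take the MINIMUM priority among all matches, and index a label
-- # table with it; the fallback decides by the blocked-domain scan.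
-- _URL_PRIO = {'github.com': 0, 'linkedin.com': 1, 'twitter.com': 2, 'x.com': 2,
--              'mailto:': 4, 'instagram.com': 5, 'youtube.com': 6, 'youtu.be': 6,
--              'medium.com': 7}
-- _TEXT_PRIO = {'github': 0, 'linkedin': 1, 'twitter': 2, 'website': 3,
--               'portfolio': 3, 'email': 4, 'instagram': 5, 'youtube': 6,
--               'medium': 7}
-- _LABELS = ['github', 'linkedin', 'twitter', 'website', 'email', 'instagram',
--            'youtube', 'medium']
--
--
-- def classify_link(url, text):
--     """Classify a link based on its URL or text"""
--     url_lower = url.lower()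
--     text_lower = text.lower()
--     best = min((p for s, p in _URL_PRIO.items() if s in url_lower), default=8)
--     best = min(best,
--                min((p for s, p in _TEXT_PRIO.items() if s in text_lower), default=8))
--     if best < 8:
--         return _LABELS[best]
--     if any(d in url_lower for d in ('facebook.com', 'google.com', 'apple.com')):
--         return 'other'
--     return 'website'
-- ===== Notes on version B (the rewrite author's own statement) =====
-- stated objective: alternative
-- what changed: Replaced the first-match if-elif ladder by an exhaustive scoring pass: every URL/text pattern carries a numeric priority, B takes the minimum priority over all matches and indexes a label table with it, with the blocked-domain fallback when nothing matches.
import Mathlib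
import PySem

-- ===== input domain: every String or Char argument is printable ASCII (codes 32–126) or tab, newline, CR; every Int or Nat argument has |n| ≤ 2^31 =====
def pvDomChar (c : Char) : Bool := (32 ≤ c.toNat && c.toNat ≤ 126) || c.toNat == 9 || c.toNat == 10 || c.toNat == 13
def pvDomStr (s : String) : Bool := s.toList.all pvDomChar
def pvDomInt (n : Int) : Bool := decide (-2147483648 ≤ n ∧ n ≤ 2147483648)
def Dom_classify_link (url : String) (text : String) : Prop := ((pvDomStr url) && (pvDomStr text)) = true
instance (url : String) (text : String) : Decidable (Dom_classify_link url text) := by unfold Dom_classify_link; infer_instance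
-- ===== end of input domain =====

-- B replaces A's first-match if-elif ladder by an exhaustive scoring pass: every pattern is
-- tested, the minimum matching priority is taken, and a label table is indexed with it.

-- ===== PORT A =====
def classify_link (url : String) (text : String) : String :=
  let url_lower := PySem.Str.lower url
  let text_lower := PySem.Str.lower text
  if PySem.Str.isIn "github.com" url_lower || PySem.Str.isIn "github" text_lower then "github"
  else if PySem.Str.isIn "linkedin.com" url_lower || PySem.Str.isIn "linkedin" text_lower then "linkedin"
  else if PySem.Str.isIn "twitter.com" url_lower || PySem.Str.isIn "x.com" url_lower || PySem.Str.isIn "twitter" text_lower then "twitter"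
  else if PySem.Str.isIn "website" text_lower || PySem.Str.isIn "portfolio" text_lower then "website"
  else if PySem.Str.isIn "mailto:" url_lower || PySem.Str.isIn "email" text_lower then "email"
  else if PySem.Str.isIn "instagram.com" url_lower || PySem.Str.isIn "instagram" text_lower then "instagram"
  else if PySem.Str.isIn "youtube.com" url_lower || PySem.Str.isIn "youtu.be" url_lower || PySem.Str.isIn "youtube" text_lower then "youtube"
  else if PySem.Str.isIn "medium.com" url_lower || PySem.Str.isIn "medium" text_lower then "medium"
  else if !(["facebook.com", "google.com", "apple.com"].any (fun d => PySem.Str.isIn d url_lower)) then "website"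
  else "other"

-- ===== PORT B =====
def pvUrlPrio : List (String × Int) :=
  [("github.com", 0), ("linkedin.com", 1), ("twitter.com", 2), ("x.com", 2),
   ("mailto:", 4), ("instagram.com", 5), ("youtube.com", 6), ("youtu.be", 6), ("medium.com", 7)]

def pvTextPrio : List (String × Int) :=
  [("github", 0), ("linkedin", 1), ("twitter", 2), ("website", 3), ("portfolio", 3),
   ("email", 4), ("instagram", 5), ("youtube", 6), ("medium", 7)]

def pvLabels : List String :=
  ["github", "linkedin", "twitter", "website", "email", "instagram", "youtube", "medium"]

def pvBlocked : List String := ["facebook.com", "google.com", "apple.com"]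

-- Source B's `min((p for s, p in PRIO.items() if s in target), default=8)`: running minimum
-- over the matched priorities, 8 when nothing matches (all priorities are < 8, so the
-- fold with initial accumulator 8 is exact).
def pvMinMatched (target : String) (prio : List (String × Int)) : Int :=
  prio.foldl (fun acc p => if PySem.Str.isIn p.1 target then min p.2 acc else acc) 8

def classify_link_alt (url : String) (text : String) : String :=
  let url_lower := PySem.Str.lower url
  let text_lower := PySem.Str.lower text
  let best := pvMinMatched url_lower pvUrlPrio
  let best := min best (pvMinMatched text_lower pvTextPrio)
  if best < 8 then
    -- _LABELS[best]: 0 ≤ best < 8 here, so the index is in range and the default is unreachable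
    (PySem.List.pyGet? pvLabels best).getD ""
  else if pvBlocked.any (fun d => PySem.Str.isIn d url_lower) then "other"
  else "website"

-- ===== PRECONDITION & SPEC =====
def Spec_classify_link (url : String) (text : String) (out : String) : Prop := out = classify_link_alt url text
instance (url : String) (text : String) (out : String) : Decidable (Spec_classify_link url text out) := by unfold Spec_classify_link; infer_instance

-- ===== CLAIM (what is proved, stated in full; the proofs are below) =====
def Claim_equal_classify_link : Prop := ∀ (url : String) (text : String), Dom_classify_link url text → Spec_classify_link url text (classify_link url text)

-- ===== LEMMAS AND PROOFS =====

theorem pvMM_le_init (t : String) (l : List (String × Int)) (acc : Int) :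
    l.foldl (fun acc p => if PySem.Str.isIn p.1 t then min p.2 acc else acc) acc ≤ acc := by
  induction l generalizing acc with
  | nil => simp
  | cons hd tl ih =>
    simp only [List.foldl_cons]
    refine le_trans (ih _) ?_
    split <;> simp

theorem pvMM_le (t : String) (l : List (String × Int)) (s : String) (p : Int) (acc : Int)
    (hmem : (s, p) ∈ l) (hin : PySem.Str.isIn s t = true) :
    l.foldl (fun acc p => if PySem.Str.isIn p.1 t then min p.2 acc else acc) acc ≤ p := by
  induction l generalizing acc with
  | nil => cases hmem
  | cons hd tl ih =>
    simp only [List.foldl_cons]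
    rcases List.mem_cons.mp hmem with h | h
    · subst h
      simp only [hin, if_true]
      exact le_trans (pvMM_le_init t tl _) (min_le_left _ _)
    · exact ih _ h

theorem pvMM_ge (t : String) (l : List (String × Int)) (c acc : Int)
    (hacc : c ≤ acc) (h : ∀ sp ∈ l, PySem.Str.isIn sp.1 t = true → c ≤ sp.2) :
    c ≤ l.foldl (fun acc p => if PySem.Str.isIn p.1 t then min p.2 acc else acc) acc := by
  induction l generalizing acc with
  | nil => simpa
  | cons hd tl ih =>
    simp only [List.foldl_cons]
    refine ih _ ?_ (fun sp hsp => h sp (List.mem_cons_of_mem _ hsp))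
    split
    · exact le_min (h hd (List.mem_cons_self) (by assumption)) hacc
    · exact hacc

theorem pvMM_none (t : String) (l : List (String × Int)) (acc : Int)
    (h : ∀ sp ∈ l, PySem.Str.isIn sp.1 t = false) :
    l.foldl (fun acc p => if PySem.Str.isIn p.1 t then min p.2 acc else acc) acc = acc := by
  induction l generalizing acc with
  | nil => rfl
  | cons hd tl ih =>
    have hhd := h hd (List.mem_cons_self)
    simp only [List.foldl_cons]
    rw [if_neg (by intro hc; rw [hhd] at hc; exact Bool.false_ne_true hc)]
    exact ih _ (fun sp hsp => h sp (List.mem_cons_of_mem _ hsp))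

-- ===== VERDICT (by name: the statement is the Claim_ definition above) =====
theorem classify_link_spec : Claim_equal_classify_link := by
  intro url text _
  unfold Spec_classify_link classify_link classify_link_alt
  simp only []
  set ul := PySem.Str.lower url with hul
  set tl := PySem.Str.lower text with htl
  set bu := pvMinMatched ul pvUrlPrio with hbu
  set bt := pvMinMatched tl pvTextPrio with hbt
  have atoms_ge : ∀ (i : Int),
      (∀ sp ∈ pvUrlPrio, PySem.Str.isIn sp.1 ul = true → i ≤ sp.2) →
      (∀ sp ∈ pvTextPrio, PySem.Str.isIn sp.1 tl = true → i ≤ sp.2) →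
      i ≤ 8 → i ≤ min bu bt := by
    intro i h1 h2 h8
    exact le_min (pvMM_ge ul pvUrlPrio i 8 h8 h1) (pvMM_ge tl pvTextPrio i 8 h8 h2)
  by_cases h0 : (PySem.Str.isIn "github.com" ul || PySem.Str.isIn "github" tl) = true
  · have hle : min bu bt ≤ (0 : Int) := by
      simp only [Bool.or_eq_true] at h0
      rcases h0 with h | h
      · exact le_trans (min_le_left _ _) (pvMM_le ul pvUrlPrio "github.com" 0 8 (by simp [pvUrlPrio]) h)
      · exact le_trans (min_le_right _ _) (pvMM_le tl pvTextPrio "github" 0 8 (by simp [pvTextPrio]) h)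
    have hge : (0 : Int) ≤ min bu bt := by
      refine atoms_ge 0 ?_ ?_ (by norm_num)
      · intro sp hsp
        fin_cases hsp
        · intro _; norm_num
        · intro _; norm_num
        · intro _; norm_num
        · intro _; norm_num
        · intro _; norm_num
        · intro _; norm_num
        · intro _; norm_num
        · intro _; norm_num
        · intro _; norm_num
      · intro sp hsp
        fin_cases hsp
        · intro _; norm_num
        · intro _; norm_num
        · intro _; norm_num
        · intro _; norm_num
        · intro _; norm_num
        · intro _; norm_num
        · intro _; norm_num
        · intro _; norm_num
        · intro _; norm_num
    have hbest : min bu bt = (0 : Int) := le_antisymm hle hge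
    rw [if_pos h0, hbest, if_pos (by norm_num : (0 : Int) < 8)]
    decide
  rw [if_neg h0]
  simp only [Bool.or_eq_true, not_or, PySem.Str.isIn_iff_infix] at h0
  by_cases h1 : (PySem.Str.isIn "linkedin.com" ul || PySem.Str.isIn "linkedin" tl) = true
  · have hle : min bu bt ≤ (1 : Int) := by
      simp only [Bool.or_eq_true] at h1
      rcases h1 with h | h
      · exact le_trans (min_le_left _ _) (pvMM_le ul pvUrlPrio "linkedin.com" 1 8 (by simp [pvUrlPrio]) h)
      · exact le_trans (min_le_right _ _) (pvMM_le tl pvTextPrio "linkedin" 1 8 (by simp [pvTextPrio]) h)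
    have hge : (1 : Int) ≤ min bu bt := by
      refine atoms_ge 1 ?_ ?_ (by norm_num)
      · intro sp hsp
        fin_cases hsp
        · intro hx; simp only [PySem.Str.isIn_iff_infix] at hx; exact absurd hx h0.1
        · intro _; norm_num
        · intro _; norm_num
        · intro _; norm_num
        · intro _; norm_num
        · intro _; norm_num
        · intro _; norm_num
        · intro _; norm_num
        · intro _; norm_num
      · intro sp hsp
        fin_cases hsp
        · intro hx; simp only [PySem.Str.isIn_iff_infix] at hx; exact absurd hx h0.2
        · intro _; norm_num
        · intro _; norm_num
        · intro _; norm_num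
        · intro _; norm_num
        · intro _; norm_num
        · intro _; norm_num
        · intro _; norm_num
        · intro _; norm_num
    have hbest : min bu bt = (1 : Int) := le_antisymm hle hge
    rw [if_pos h1, hbest, if_pos (by norm_num : (1 : Int) < 8)]
    decide
  rw [if_neg h1]
  simp only [Bool.or_eq_true, not_or, PySem.Str.isIn_iff_infix] at h1
  by_cases h2 : (PySem.Str.isIn "twitter.com" ul || PySem.Str.isIn "x.com" ul || PySem.Str.isIn "twitter" tl) = true
  · have hle : min bu bt ≤ (2 : Int) := by
      simp only [Bool.or_eq_true] at h2
      rcases h2 with (h | h) | h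
      · exact le_trans (min_le_left _ _) (pvMM_le ul pvUrlPrio "twitter.com" 2 8 (by simp [pvUrlPrio]) h)
      · exact le_trans (min_le_left _ _) (pvMM_le ul pvUrlPrio "x.com" 2 8 (by simp [pvUrlPrio]) h)
      · exact le_trans (min_le_right _ _) (pvMM_le tl pvTextPrio "twitter" 2 8 (by simp [pvTextPrio]) h)
    have hge : (2 : Int) ≤ min bu bt := by
      refine atoms_ge 2 ?_ ?_ (by norm_num)
      · intro sp hsp
        fin_cases hsp
        · intro hx; simp only [PySem.Str.isIn_iff_infix] at hx; exact absurd hx h0.1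
        · intro hx; simp only [PySem.Str.isIn_iff_infix] at hx; exact absurd hx h1.1
        · intro _; norm_num
        · intro _; norm_num
        · intro _; norm_num
        · intro _; norm_num
        · intro _; norm_num
        · intro _; norm_num
        · intro _; norm_num
      · intro sp hsp
        fin_cases hsp
        · intro hx; simp only [PySem.Str.isIn_iff_infix] at hx; exact absurd hx h0.2
        · intro hx; simp only [PySem.Str.isIn_iff_infix] at hx; exact absurd hx h1.2
        · intro _; norm_num
        · intro _; norm_num
        · intro _; norm_num
        · intro _; norm_num
        · intro _; norm_num
        · intro _; norm_num
        · intro _; norm_num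
    have hbest : min bu bt = (2 : Int) := le_antisymm hle hge
    rw [if_pos h2, hbest, if_pos (by norm_num : (2 : Int) < 8)]
    decide
  rw [if_neg h2]
  simp only [Bool.or_eq_true, not_or, PySem.Str.isIn_iff_infix] at h2
  by_cases h3 : (PySem.Str.isIn "website" tl || PySem.Str.isIn "portfolio" tl) = true
  · have hle : min bu bt ≤ (3 : Int) := by
      simp only [Bool.or_eq_true] at h3
      rcases h3 with h | h
      · exact le_trans (min_le_right _ _) (pvMM_le tl pvTextPrio "website" 3 8 (by simp [pvTextPrio]) h)
      · exact le_trans (min_le_right _ _) (pvMM_le tl pvTextPrio "portfolio" 3 8 (by simp [pvTextPrio]) h)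
    have hge : (3 : Int) ≤ min bu bt := by
      refine atoms_ge 3 ?_ ?_ (by norm_num)
      · intro sp hsp
        fin_cases hsp
        · intro hx; simp only [PySem.Str.isIn_iff_infix] at hx; exact absurd hx h0.1
        · intro hx; simp only [PySem.Str.isIn_iff_infix] at hx; exact absurd hx h1.1
        · intro hx; simp only [PySem.Str.isIn_iff_infix] at hx; exact absurd hx h2.1.1
        · intro hx; simp only [PySem.Str.isIn_iff_infix] at hx; exact absurd hx h2.1.2
        · intro _; norm_num
        · intro _; norm_num
        · intro _; norm_num
        · intro _; norm_num
        · intro _; norm_num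
      · intro sp hsp
        fin_cases hsp
        · intro hx; simp only [PySem.Str.isIn_iff_infix] at hx; exact absurd hx h0.2
        · intro hx; simp only [PySem.Str.isIn_iff_infix] at hx; exact absurd hx h1.2
        · intro hx; simp only [PySem.Str.isIn_iff_infix] at hx; exact absurd hx h2.2
        · intro _; norm_num
        · intro _; norm_num
        · intro _; norm_num
        · intro _; norm_num
        · intro _; norm_num
        · intro _; norm_num
    have hbest : min bu bt = (3 : Int) := le_antisymm hle hge
    rw [if_pos h3, hbest, if_pos (by norm_num : (3 : Int) < 8)]
    decide
  rw [if_neg h3]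
  simp only [Bool.or_eq_true, not_or, PySem.Str.isIn_iff_infix] at h3
  by_cases h4 : (PySem.Str.isIn "mailto:" ul || PySem.Str.isIn "email" tl) = true
  · have hle : min bu bt ≤ (4 : Int) := by
      simp only [Bool.or_eq_true] at h4
      rcases h4 with h | h
      · exact le_trans (min_le_left _ _) (pvMM_le ul pvUrlPrio "mailto:" 4 8 (by simp [pvUrlPrio]) h)
      · exact le_trans (min_le_right _ _) (pvMM_le tl pvTextPrio "email" 4 8 (by simp [pvTextPrio]) h)
    have hge : (4 : Int) ≤ min bu bt := by
      refine atoms_ge 4 ?_ ?_ (by norm_num)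
      · intro sp hsp
        fin_cases hsp
        · intro hx; simp only [PySem.Str.isIn_iff_infix] at hx; exact absurd hx h0.1
        · intro hx; simp only [PySem.Str.isIn_iff_infix] at hx; exact absurd hx h1.1
        · intro hx; simp only [PySem.Str.isIn_iff_infix] at hx; exact absurd hx h2.1.1
        · intro hx; simp only [PySem.Str.isIn_iff_infix] at hx; exact absurd hx h2.1.2
        · intro _; norm_num
        · intro _; norm_num
        · intro _; norm_num
        · intro _; norm_num
        · intro _; norm_num
      · intro sp hsp
        fin_cases hsp
        · intro hx; simp only [PySem.Str.isIn_iff_infix] at hx; exact absurd hx h0.2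
        · intro hx; simp only [PySem.Str.isIn_iff_infix] at hx; exact absurd hx h1.2
        · intro hx; simp only [PySem.Str.isIn_iff_infix] at hx; exact absurd hx h2.2
        · intro hx; simp only [PySem.Str.isIn_iff_infix] at hx; exact absurd hx h3.1
        · intro hx; simp only [PySem.Str.isIn_iff_infix] at hx; exact absurd hx h3.2
        · intro _; norm_num
        · intro _; norm_num
        · intro _; norm_num
        · intro _; norm_num
    have hbest : min bu bt = (4 : Int) := le_antisymm hle hge
    rw [if_pos h4, hbest, if_pos (by norm_num : (4 : Int) < 8)]
    decide
  rw [if_neg h4]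
  simp only [Bool.or_eq_true, not_or, PySem.Str.isIn_iff_infix] at h4
  by_cases h5 : (PySem.Str.isIn "instagram.com" ul || PySem.Str.isIn "instagram" tl) = true
  · have hle : min bu bt ≤ (5 : Int) := by
      simp only [Bool.or_eq_true] at h5
      rcases h5 with h | h
      · exact le_trans (min_le_left _ _) (pvMM_le ul pvUrlPrio "instagram.com" 5 8 (by simp [pvUrlPrio]) h)
      · exact le_trans (min_le_right _ _) (pvMM_le tl pvTextPrio "instagram" 5 8 (by simp [pvTextPrio]) h)
    have hge : (5 : Int) ≤ min bu bt := by
      refine atoms_ge 5 ?_ ?_ (by norm_num)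
      · intro sp hsp
        fin_cases hsp
        · intro hx; simp only [PySem.Str.isIn_iff_infix] at hx; exact absurd hx h0.1
        · intro hx; simp only [PySem.Str.isIn_iff_infix] at hx; exact absurd hx h1.1
        · intro hx; simp only [PySem.Str.isIn_iff_infix] at hx; exact absurd hx h2.1.1
        · intro hx; simp only [PySem.Str.isIn_iff_infix] at hx; exact absurd hx h2.1.2
        · intro hx; simp only [PySem.Str.isIn_iff_infix] at hx; exact absurd hx h4.1
        · intro _; norm_num
        · intro _; norm_num
        · intro _; norm_num
        · intro _; norm_num
      · intro sp hsp
        fin_cases hsp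
        · intro hx; simp only [PySem.Str.isIn_iff_infix] at hx; exact absurd hx h0.2
        · intro hx; simp only [PySem.Str.isIn_iff_infix] at hx; exact absurd hx h1.2
        · intro hx; simp only [PySem.Str.isIn_iff_infix] at hx; exact absurd hx h2.2
        · intro hx; simp only [PySem.Str.isIn_iff_infix] at hx; exact absurd hx h3.1
        · intro hx; simp only [PySem.Str.isIn_iff_infix] at hx; exact absurd hx h3.2
        · intro hx; simp only [PySem.Str.isIn_iff_infix] at hx; exact absurd hx h4.2
        · intro _; norm_num
        · intro _; norm_num
        · intro _; norm_num
    have hbest : min bu bt = (5 : Int) := le_antisymm hle hge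
    rw [if_pos h5, hbest, if_pos (by norm_num : (5 : Int) < 8)]
    decide
  rw [if_neg h5]
  simp only [Bool.or_eq_true, not_or, PySem.Str.isIn_iff_infix] at h5
  by_cases h6 : (PySem.Str.isIn "youtube.com" ul || PySem.Str.isIn "youtu.be" ul || PySem.Str.isIn "youtube" tl) = true
  · have hle : min bu bt ≤ (6 : Int) := by
      simp only [Bool.or_eq_true] at h6
      rcases h6 with (h | h) | h
      · exact le_trans (min_le_left _ _) (pvMM_le ul pvUrlPrio "youtube.com" 6 8 (by simp [pvUrlPrio]) h)
      · exact le_trans (min_le_left _ _) (pvMM_le ul pvUrlPrio "youtu.be" 6 8 (by simp [pvUrlPrio]) h)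
      · exact le_trans (min_le_right _ _) (pvMM_le tl pvTextPrio "youtube" 6 8 (by simp [pvTextPrio]) h)
    have hge : (6 : Int) ≤ min bu bt := by
      refine atoms_ge 6 ?_ ?_ (by norm_num)
      · intro sp hsp
        fin_cases hsp
        · intro hx; simp only [PySem.Str.isIn_iff_infix] at hx; exact absurd hx h0.1
        · intro hx; simp only [PySem.Str.isIn_iff_infix] at hx; exact absurd hx h1.1
        · intro hx; simp only [PySem.Str.isIn_iff_infix] at hx; exact absurd hx h2.1.1
        · intro hx; simp only [PySem.Str.isIn_iff_infix] at hx; exact absurd hx h2.1.2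
        · intro hx; simp only [PySem.Str.isIn_iff_infix] at hx; exact absurd hx h4.1
        · intro hx; simp only [PySem.Str.isIn_iff_infix] at hx; exact absurd hx h5.1
        · intro _; norm_num
        · intro _; norm_num
        · intro _; norm_num
      · intro sp hsp
        fin_cases hsp
        · intro hx; simp only [PySem.Str.isIn_iff_infix] at hx; exact absurd hx h0.2
        · intro hx; simp only [PySem.Str.isIn_iff_infix] at hx; exact absurd hx h1.2
        · intro hx; simp only [PySem.Str.isIn_iff_infix] at hx; exact absurd hx h2.2
        · intro hx; simp only [PySem.Str.isIn_iff_infix] at hx; exact absurd hx h3.1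
        · intro hx; simp only [PySem.Str.isIn_iff_infix] at hx; exact absurd hx h3.2
        · intro hx; simp only [PySem.Str.isIn_iff_infix] at hx; exact absurd hx h4.2
        · intro hx; simp only [PySem.Str.isIn_iff_infix] at hx; exact absurd hx h5.2
        · intro _; norm_num
        · intro _; norm_num
    have hbest : min bu bt = (6 : Int) := le_antisymm hle hge
    rw [if_pos h6, hbest, if_pos (by norm_num : (6 : Int) < 8)]
    decide
  rw [if_neg h6]
  simp only [Bool.or_eq_true, not_or, PySem.Str.isIn_iff_infix] at h6
  by_cases h7 : (PySem.Str.isIn "medium.com" ul || PySem.Str.isIn "medium" tl) = true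
  · have hle : min bu bt ≤ (7 : Int) := by
      simp only [Bool.or_eq_true] at h7
      rcases h7 with h | h
      · exact le_trans (min_le_left _ _) (pvMM_le ul pvUrlPrio "medium.com" 7 8 (by simp [pvUrlPrio]) h)
      · exact le_trans (min_le_right _ _) (pvMM_le tl pvTextPrio "medium" 7 8 (by simp [pvTextPrio]) h)
    have hge : (7 : Int) ≤ min bu bt := by
      refine atoms_ge 7 ?_ ?_ (by norm_num)
      · intro sp hsp
        fin_cases hsp
        · intro hx; simp only [PySem.Str.isIn_iff_infix] at hx; exact absurd hx h0.1
        · intro hx; simp only [PySem.Str.isIn_iff_infix] at hx; exact absurd hx h1.1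
        · intro hx; simp only [PySem.Str.isIn_iff_infix] at hx; exact absurd hx h2.1.1
        · intro hx; simp only [PySem.Str.isIn_iff_infix] at hx; exact absurd hx h2.1.2
        · intro hx; simp only [PySem.Str.isIn_iff_infix] at hx; exact absurd hx h4.1
        · intro hx; simp only [PySem.Str.isIn_iff_infix] at hx; exact absurd hx h5.1
        · intro hx; simp only [PySem.Str.isIn_iff_infix] at hx; exact absurd hx h6.1.1
        · intro hx; simp only [PySem.Str.isIn_iff_infix] at hx; exact absurd hx h6.1.2
        · intro _; norm_num
      · intro sp hsp
        fin_cases hsp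
        · intro hx; simp only [PySem.Str.isIn_iff_infix] at hx; exact absurd hx h0.2
        · intro hx; simp only [PySem.Str.isIn_iff_infix] at hx; exact absurd hx h1.2
        · intro hx; simp only [PySem.Str.isIn_iff_infix] at hx; exact absurd hx h2.2
        · intro hx; simp only [PySem.Str.isIn_iff_infix] at hx; exact absurd hx h3.1
        · intro hx; simp only [PySem.Str.isIn_iff_infix] at hx; exact absurd hx h3.2
        · intro hx; simp only [PySem.Str.isIn_iff_infix] at hx; exact absurd hx h4.2
        · intro hx; simp only [PySem.Str.isIn_iff_infix] at hx; exact absurd hx h5.2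
        · intro hx; simp only [PySem.Str.isIn_iff_infix] at hx; exact absurd hx h6.2
        · intro _; norm_num
    have hbest : min bu bt = (7 : Int) := le_antisymm hle hge
    rw [if_pos h7, hbest, if_pos (by norm_num : (7 : Int) < 8)]
    decide
  rw [if_neg h7]
  simp only [Bool.or_eq_true, not_or, PySem.Str.isIn_iff_infix] at h7
  have hbu8 : bu = 8 := by
    apply pvMM_none
    intro sp hsp
    fin_cases hsp
    · simp only [Bool.eq_false_iff, Ne, PySem.Str.isIn_iff_infix]; exact h0.1
    · simp only [Bool.eq_false_iff, Ne, PySem.Str.isIn_iff_infix]; exact h1.1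
    · simp only [Bool.eq_false_iff, Ne, PySem.Str.isIn_iff_infix]; exact h2.1.1
    · simp only [Bool.eq_false_iff, Ne, PySem.Str.isIn_iff_infix]; exact h2.1.2
    · simp only [Bool.eq_false_iff, Ne, PySem.Str.isIn_iff_infix]; exact h4.1
    · simp only [Bool.eq_false_iff, Ne, PySem.Str.isIn_iff_infix]; exact h5.1
    · simp only [Bool.eq_false_iff, Ne, PySem.Str.isIn_iff_infix]; exact h6.1.1
    · simp only [Bool.eq_false_iff, Ne, PySem.Str.isIn_iff_infix]; exact h6.1.2
    · simp only [Bool.eq_false_iff, Ne, PySem.Str.isIn_iff_infix]; exact h7.1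
  have hbt8 : bt = 8 := by
    apply pvMM_none
    intro sp hsp
    fin_cases hsp
    · simp only [Bool.eq_false_iff, Ne, PySem.Str.isIn_iff_infix]; exact h0.2
    · simp only [Bool.eq_false_iff, Ne, PySem.Str.isIn_iff_infix]; exact h1.2
    · simp only [Bool.eq_false_iff, Ne, PySem.Str.isIn_iff_infix]; exact h2.2
    · simp only [Bool.eq_false_iff, Ne, PySem.Str.isIn_iff_infix]; exact h3.1
    · simp only [Bool.eq_false_iff, Ne, PySem.Str.isIn_iff_infix]; exact h3.2
    · simp only [Bool.eq_false_iff, Ne, PySem.Str.isIn_iff_infix]; exact h4.2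
    · simp only [Bool.eq_false_iff, Ne, PySem.Str.isIn_iff_infix]; exact h5.2
    · simp only [Bool.eq_false_iff, Ne, PySem.Str.isIn_iff_infix]; exact h6.2
    · simp only [Bool.eq_false_iff, Ne, PySem.Str.isIn_iff_infix]; exact h7.2
  rw [hbu8, hbt8, if_neg (by norm_num : ¬ (min (8:Int) 8 < 8))]
  simp only [pvBlocked]
  rcases Bool.eq_false_or_eq_true (["facebook.com", "google.com", "apple.com"].any (fun d => PySem.Str.isIn d ul)) with hb | hb <;>
    simp only [hb] <;> simp
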